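-- pv_equiv track=rewrite | github.com/micheloosterhof/aldegonde | lib.py | isomorph
-- ===== SOURCE A (Python) =====
-- from collections import Counter, defaultdict
-- from typing import Dict, List
--
-- def isomorph(
--     ciphertext: List[int], min: int = 2, max: int = 10
-- ):  # -> Dict(List[int], int):
--     """
--     Find repeating sequences in the list, up to `max`. Max defaults to 10
--     Returns dictionary with as key the sequence as a string, and as value the number of occurences
--     """
--     sequences = {}
--     for length in range(min, max + 1):
--         l = []
--         for index in range(0, len(ciphertext) - length + 1):
--             k = "-".join([str(x) for x in ciphertext[index : index + length]])
--             l.append(k)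
--         f = Counter(l)
--         for k in f.keys():
--             if f[k] > 1:
--                 sequences[k] = f[k]
--
--     return sequences
-- ===== SOURCE B (Python) =====
-- from collections import Counter, defaultdict
-- from typing import Dict, List
--
-- def isomorph(
--     ciphertext: List[int], min: int = 2, max: int = 10
-- ):  # -> Dict(List[int], int):
--     """
--     Single forward sweep per start position: the window key is grown
--     incrementally and counted into a per-length Counter, instead of
--     re-scanning and re-joining every window for every length.
--     """
--     n = len(ciphertext)
--     counters = defaultdict(Counter)
--     for i in range(n):
--         key = ""
--         last = n if n < i + max else i + max
--         for j in range(i, last):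
--             key = str(ciphertext[j]) if j == i else key + "-" + str(ciphertext[j])
--             if min <= j - i + 1:
--                 counters[j - i + 1][key] += 1
--     result = {}
--     for length in range(min, max + 1):
--         for k, c in counters[length].items():
--             if c > 1:
--                 result[k] = c
--     return result
-- ===== Notes on version B (the rewrite author's own statement) =====
-- stated objective: alternative
-- what changed: Instead of re-scanning and re-joining every window for every length in an outer length loop, B makes one forward sweep per start position, growing the window key string incrementally and counting it into a per-length Counter in a single pass.
-- intended difference: On inputs with min <= max, min <= 0 and len(ciphertext) >= min+1, A counts empty slices of non-positive window length and returns a spurious entry with key '' (e.g. {'': 2} on ([1], 0, 1)), while B returns only genuine positive-length repeated sequences ({} there), which is the intended behaviour. — e.g. on isomorph([1], 0, 1): A returns [("", 2)], B returns []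
import Mathlib
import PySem

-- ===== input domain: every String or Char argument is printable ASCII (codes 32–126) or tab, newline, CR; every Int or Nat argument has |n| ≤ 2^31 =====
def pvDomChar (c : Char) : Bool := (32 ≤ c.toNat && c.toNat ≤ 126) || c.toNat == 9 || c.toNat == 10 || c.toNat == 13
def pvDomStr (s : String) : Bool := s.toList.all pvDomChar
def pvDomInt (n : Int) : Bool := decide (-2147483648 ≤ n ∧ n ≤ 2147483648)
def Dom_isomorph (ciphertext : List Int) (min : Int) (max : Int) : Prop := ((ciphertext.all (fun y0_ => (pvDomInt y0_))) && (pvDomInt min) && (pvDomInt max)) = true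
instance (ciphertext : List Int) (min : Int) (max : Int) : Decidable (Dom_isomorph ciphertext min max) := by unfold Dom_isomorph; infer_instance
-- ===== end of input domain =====

-- B replaces A's per-length window rescan by one incremental forward sweep per start position (alternative decomposition, same results for positive-length windows; for non-positive `min` A's spurious ''-entries are stated as an intended difference D_ below).

-- ===== PORT A =====
def isomorph (ciphertext : List Int) (min : Int) (max : Int) : List (String × Int) :=
  let sequences : PySem.Dict String Int :=
    (PySem.List.pyRange min (max + 1) 1).foldl (fun sequences length =>
      let l : List String :=
        (PySem.List.pyRange 0 ((ciphertext.length : Int) - length + 1) 1).foldl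
          (fun l index =>
            l ++ [PySem.Str.join "-"
              ((PySem.List.slice ciphertext (some index) (some (index + length))).map PySem.Int.toStr)]) []
      let f := PySem.Dict.counter l
      f.keys.foldl (fun sequences k =>
        if f.getD k 0 > 1 then sequences.insert k (f.getD k 0) else sequences) sequences)
      PySem.Dict.empty
  sequences.items

-- ===== PORT B =====
def isomorph_alt (ciphertext : List Int) (min : Int) (max : Int) : List (String × Int) :=
  let n : Int := (ciphertext.length : Int)
  let counters : PySem.Dict Int (PySem.Dict String Int) :=
    (PySem.List.pyRange 0 n 1).foldl (fun cs i =>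
      ((PySem.List.pyRange i (if n < i + max then n else i + max) 1).foldl
        (fun (st : String × PySem.Dict Int (PySem.Dict String Int)) j =>
          let key := if j = i then PySem.Int.toStr (PySem.List.pyGetD ciphertext j 0)
                     else st.1 ++ "-" ++ PySem.Int.toStr (PySem.List.pyGetD ciphertext j 0)
          (key, if min ≤ j - i + 1
                then st.2.modify (j - i + 1) PySem.Dict.empty (fun d => d.modify key 0 (· + 1))
                else st.2))
        ("", cs)).2)
      PySem.Dict.empty
  let result : PySem.Dict String Int :=
    (PySem.List.pyRange min (max + 1) 1).foldl (fun result length =>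
      ((counters.getD length PySem.Dict.empty).items).foldl
        (fun result kc => if kc.2 > 1 then result.insert kc.1 kc.2 else result) result)
      PySem.Dict.empty
  result.items

-- ===== PRECONDITION & SPEC =====
-- On inputs with min ≤ max, min ≤ 0 and len(ciphertext) ≥ min+1, A counts empty slices of
-- non-positive window length and returns a spurious entry keyed '' , while B returns only
-- genuine positive-length repeated sequences, which is the intended behaviour.
def D_isomorph (ciphertext : List Int) (min : Int) (max : Int) : Prop :=
  min ≤ max ∧ min ≤ 0 ∧ min + 1 ≤ (ciphertext.length : Int)
instance (ciphertext : List Int) (min : Int) (max : Int) : Decidable (D_isomorph ciphertext min max) := by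
  unfold D_isomorph; infer_instance
def Spec_isomorph (ciphertext : List Int) (min : Int) (max : Int) (out : List (String × Int)) : Prop :=
  ¬ D_isomorph ciphertext min max → out = isomorph_alt ciphertext min max
instance (ciphertext : List Int) (min : Int) (max : Int) (out : List (String × Int)) : Decidable (Spec_isomorph ciphertext min max out) := by
  unfold Spec_isomorph; infer_instance
def pvDiffWitness_isomorph : List Int × Int × Int := ([1], 0, 1)
def pvDiffWitnessOut_isomorph : (List (String × Int)) × (List (String × Int)) := ([("", 2)], [])

-- ===== CLAIM (what is proved, stated in full; the proofs are below) =====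
def Claim_unchanged_isomorph : Prop := ∀ (ciphertext : List Int) (min : Int) (max : Int), Dom_isomorph ciphertext min max → Spec_isomorph ciphertext min max (isomorph ciphertext min max)
def Claim_changed_isomorph : Prop := Dom_isomorph (pvDiffWitness_isomorph.1) (pvDiffWitness_isomorph.2.1) (pvDiffWitness_isomorph.2.2) ∧ D_isomorph (pvDiffWitness_isomorph.1) (pvDiffWitness_isomorph.2.1) (pvDiffWitness_isomorph.2.2) ∧ isomorph (pvDiffWitness_isomorph.1) (pvDiffWitness_isomorph.2.1) (pvDiffWitness_isomorph.2.2) = pvDiffWitnessOut_isomorph.1 ∧ isomorph_alt (pvDiffWitness_isomorph.1) (pvDiffWitness_isomorph.2.1) (pvDiffWitness_isomorph.2.2) = pvDiffWitnessOut_isomorph.2 ∧ pvDiffWitnessOut_isomorph.1 ≠ pvDiffWitnessOut_isomorph.2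

-- ===== LEMMAS AND PROOFS =====

-- the key string of the window of length L starting at i (exactly A's join expression)
def keyW (c : List Int) (i L : Int) : String :=
  PySem.Str.join "-" ((PySem.List.slice c (some i) (some (i + L))).map PySem.Int.toStr)

-- one conditional per-length counter update of B's sweep, for start i and length L
def lenStep (mn : Int) (c : List Int) (i : Int)
    (cs : PySem.Dict Int (PySem.Dict String Int)) (L : Int) :
    PySem.Dict Int (PySem.Dict String Int) :=
  if mn ≤ L then cs.modify L PySem.Dict.empty (fun d => d.modify (keyW c i L) 0 (· + 1)) else cs

lemma chars_join_append (sep : List Char) (l : List (List Char)) (x : List Char) (h : l ≠ []) :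
    PySem.Chars.join sep (l ++ [x]) = PySem.Chars.join sep l ++ sep ++ x := by
  induction l with
  | nil => exact absurd rfl h
  | cons a rest ih =>
    cases rest with
    | nil => simp [PySem.Chars.join_cons_cons, PySem.Chars.join_singleton]
    | cons b r =>
      simp only [List.cons_append] at ih ⊢
      rw [PySem.Chars.join_cons_cons, PySem.Chars.join_cons_cons, ih (by simp)]
      simp [List.append_assoc]

lemma slice_snoc (c : List Int) (i : Int) (t : Nat) (hi : 0 ≤ i)
    (h : i + (t : Int) < (c.length : Int)) :
    PySem.List.slice c (some i) (some (i + ((t : Int) + 1)))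
      = PySem.List.slice c (some i) (some (i + (t : Int))) ++ [PySem.List.pyGetD c (i + (t : Int)) 0] := by
  rw [PySem.List.slice_toNat c hi (by omega), PySem.List.slice_toNat c hi (by omega)]
  have h1 : (i + ((t : Int) + 1)).toNat - i.toNat = t + 1 := by omega
  have h2 : (i + (t : Int)).toNat - i.toNat = t := by omega
  have hlen : i.toNat + t < c.length := by omega
  rw [h1, h2, List.take_add_one]
  congr 1
  have hlt : t < (c.drop i.toNat).length := by simp [List.length_drop]; omega
  rw [List.getElem?_eq_getElem hlt]
  rw [PySem.List.pyGetD_eq_getElem c 0 (by omega) h]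
  have e3 : (i + (t : Int)).toNat = i.toNat + t := by omega
  simp [List.getElem_drop, e3]

lemma keyW_one (c : List Int) (i : Int) (hi : 0 ≤ i) (h : i < (c.length : Int)) :
    keyW c i 1 = PySem.Int.toStr (PySem.List.pyGetD c i 0) := by
  unfold keyW
  rw [PySem.List.slice_toNat c hi (by omega)]
  have h1 : (i + 1).toNat - i.toNat = 1 := by omega
  have hlt : i.toNat < c.length := by omega
  have h2 : (List.drop i.toNat c).take 1 = [c.getD i.toNat 0] := by
    rw [List.drop_eq_getElem_cons hlt]
    simp only [List.getD_eq_getElem?_getD, List.getElem?_eq_getElem hlt, Option.getD_some]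
    rfl
  have h3 : PySem.List.pyGetD c i 0 = c.getD i.toNat 0 := by
    conv_lhs => rw [show i = ((i.toNat : Nat) : Int) by omega]
    rw [PySem.List.pyGetD_natCast]
  rw [h1, h2, h3]
  rw [← String.toList_inj]
  simp [PySem.Str.toList_join, PySem.Chars.join_singleton]

lemma keyW_succ (c : List Int) (i : Int) (t : Nat) (hi : 0 ≤ i) (ht : 1 ≤ t)
    (h : i + (t : Int) < (c.length : Int)) :
    keyW c i ((t : Int) + 1) = keyW c i (t : Int) ++ "-" ++ PySem.Int.toStr (PySem.List.pyGetD c (i + (t : Int)) 0) := by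
  unfold keyW
  rw [slice_snoc c i t hi h, List.map_append]
  rw [← String.toList_inj]
  have hne : ((PySem.List.slice c (some i) (some (i + (t : Int)))).map PySem.Int.toStr).map String.toList ≠ [] := by
    rw [PySem.List.slice_toNat c hi (by omega)]
    have h2 : (i + (t : Int)).toNat - i.toNat = t := by omega
    simp [h2]
    omega
  simp only [PySem.Str.toList_join, String.toList_append, List.map_append, List.map_cons,
    List.map_nil]
  rw [chars_join_append _ _ _ hne]

-- B's inner sweep from start i, processed up to i+t, yields the current key and the
-- accumulated per-length updates for lengths 1..t
lemma sweepEq (c : List Int) (mn : Int) (i : Int) (t : Nat) (hi : 0 ≤ i)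
    (hin : i + (t : Int) ≤ (c.length : Int)) (cs : PySem.Dict Int (PySem.Dict String Int)) :
    (PySem.List.pyRange i (i + (t : Int)) 1).foldl
        (fun (st : String × PySem.Dict Int (PySem.Dict String Int)) j =>
          let key := if j = i then PySem.Int.toStr (PySem.List.pyGetD c j 0)
                     else st.1 ++ "-" ++ PySem.Int.toStr (PySem.List.pyGetD c j 0)
          (key, if mn ≤ j - i + 1
                then st.2.modify (j - i + 1) PySem.Dict.empty (fun d => d.modify key 0 (· + 1))
                else st.2))
        ("", cs)
      = ((if 0 < t then keyW c i (t : Int) else ""),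
         (PySem.List.pyRange 1 ((t : Int) + 1) 1).foldl (lenStep mn c i) cs) := by
  induction t with
  | zero =>
    rw [show ((0 : Nat) : Int) = 0 by norm_num]
    rw [PySem.List.pyRange_one_eq_nil (by omega : i + 0 ≤ i),
      PySem.List.pyRange_one_eq_nil (by omega : (0 : Int) + 1 ≤ 1)]
    simp
  | succ t ih =>
    have hin' : i + (t : Int) ≤ (c.length : Int) := by push_cast at hin ⊢; omega
    have hilt : i + (t : Int) < (c.length : Int) := by push_cast at hin; omega
    rw [show (i + ((t + 1 : Nat) : Int)) = (i + (t : Int)) + 1 by push_cast; ring]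
    rw [PySem.List.pyRange_one_succ_right (by omega), List.foldl_append, ih hin']
    rw [show (((t + 1 : Nat) : Int) + 1) = ((t : Int) + 1) + 1 by push_cast; ring]
    rw [PySem.List.pyRange_one_succ_right (by omega : (1 : Int) ≤ (t : Int) + 1),
      List.foldl_append]
    simp only [List.foldl_cons, List.foldl_nil]
    by_cases ht0 : t = 0
    · subst ht0
      have hk : PySem.Int.toStr (PySem.List.pyGetD c i 0) = keyW c i 1 :=
        (keyW_one c i hi (by push_cast at hin; omega)).symm
      push_cast
      simp only [add_zero, zero_add, sub_self]
      norm_num [hk, lenStep]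
    · have ht1 : 1 ≤ t := by omega
      have hne : ¬ (i + (t : Int) = i) := by omega
      have hkey := keyW_succ c i t hi ht1 hilt
      simp only [if_neg hne, if_pos (by omega : 0 < t), if_pos (by omega : 0 < t + 1)]
      push_cast at hkey ⊢
      rw [show i + (t : Int) - i + 1 = (t : Int) + 1 by ring]
      rw [← hkey]
      simp [lenStep]

-- projection of a run of lenSteps at one length
lemma getD_lenSteps (mn : Int) (c : List Int) (i L b : Int)
    (cs : PySem.Dict Int (PySem.Dict String Int)) :
    ((PySem.List.pyRange 1 b 1).foldl (lenStep mn c i) cs).getD L PySem.Dict.empty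
      = if 1 ≤ L ∧ L < b ∧ mn ≤ L
        then (cs.getD L PySem.Dict.empty).modify (keyW c i L) 0 (· + 1)
        else cs.getD L PySem.Dict.empty := by
  have H : ∀ (x : PySem.Dict Int (PySem.Dict String Int)) (y : Int),
      (if y = L ∧ mn ≤ y then (x.getD L PySem.Dict.empty).modify (keyW c i L) 0 (· + 1)
       else x.getD L PySem.Dict.empty)
        = (lenStep mn c i x y).getD L PySem.Dict.empty := by
    intro x y
    unfold lenStep
    by_cases hy : mn ≤ y
    · rw [if_pos hy, PySem.Dict.getD_modify]
      by_cases hxy : L = y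
      · subst hxy; rw [if_pos rfl, if_pos ⟨rfl, hy⟩]
      · rw [if_neg hxy, if_neg (by tauto)]
    · rw [if_neg hy, if_neg (by tauto)]
  rw [← List.foldl_hom (fun cs : PySem.Dict Int (PySem.Dict String Int) => cs.getD L PySem.Dict.empty)
    (g₁ := lenStep mn c i)
    (g₂ := fun d y => if y = L ∧ mn ≤ y then d.modify (keyW c i L) 0 (· + 1) else d) H]
  by_cases hc : 1 ≤ L ∧ L < b ∧ mn ≤ L
  · obtain ⟨h1, h2, h3⟩ := hc
    rw [if_pos ⟨h1, h2, h3⟩]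
    rw [PySem.List.pyRange_one_append 1 L b h1 (by omega), List.foldl_append,
      PySem.List.pyRange_one_cons h2, List.foldl_cons]
    rw [PySem.List.foldl_congr_mem _ _ (fun d _ => d) _ (by
      intro acc x hx; rw [PySem.List.mem_pyRange_one] at hx
      rw [if_neg (by rintro ⟨rfl, -⟩; omega)]), PySem.List.foldl_ignore]
    rw [if_pos ⟨rfl, h3⟩]
    rw [PySem.List.foldl_congr_mem _ _ (fun d _ => d) _ (by
      intro acc x hx; rw [PySem.List.mem_pyRange_one] at hx
      rw [if_neg (by rintro ⟨rfl, -⟩; omega)]), PySem.List.foldl_ignore]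
  · rw [if_neg hc]
    rw [PySem.List.foldl_congr_mem _ _ (fun d _ => d) _ (by
      intro acc x hx; rw [PySem.List.mem_pyRange_one] at hx
      rw [if_neg (by rintro ⟨rfl, hmn⟩; exact hc ⟨by omega, by omega, hmn⟩)]),
      PySem.List.foldl_ignore]

lemma filter_range_cut (n L : Int) (hL : 1 ≤ L) :
    (PySem.List.pyRange 0 n 1).filter (fun i => decide (i + L ≤ n)) = PySem.List.pyRange 0 (n - L + 1) 1 := by
  by_cases hn : n < L
  · rw [PySem.List.pyRange_one_eq_nil (by omega : n - L + 1 ≤ 0)]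
    refine List.filter_eq_nil_iff.mpr ?_
    intro a ha; rw [PySem.List.mem_pyRange_one] at ha
    simp only [decide_eq_true_eq]; omega
  · push Not at hn
    rw [PySem.List.pyRange_one_append 0 (n - L + 1) n (by omega) (by omega), List.filter_append]
    rw [List.filter_eq_self.mpr (by
      intro a ha; rw [PySem.List.mem_pyRange_one] at ha
      simp only [decide_eq_true_eq]; omega)]
    rw [List.filter_eq_nil_iff.mpr (by
      intro a ha; rw [PySem.List.mem_pyRange_one] at ha
      simp only [decide_eq_true_eq]; omega), List.append_nil]

-- the per-length counters B accumulates, characterised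
lemma counters_getD (c : List Int) (mn mx L : Int) :
    ((PySem.List.pyRange 0 (c.length : Int) 1).foldl (fun cs i =>
      ((PySem.List.pyRange i (if (c.length : Int) < i + mx then (c.length : Int) else i + mx) 1).foldl
        (fun (st : String × PySem.Dict Int (PySem.Dict String Int)) j =>
          let key := if j = i then PySem.Int.toStr (PySem.List.pyGetD c j 0)
                     else st.1 ++ "-" ++ PySem.Int.toStr (PySem.List.pyGetD c j 0)
          (key, if mn ≤ j - i + 1
                then st.2.modify (j - i + 1) PySem.Dict.empty (fun d => d.modify key 0 (· + 1))
                else st.2))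
        ("", cs)).2)
      PySem.Dict.empty).getD L PySem.Dict.empty
      = if 1 ≤ L ∧ L ≤ mx ∧ mn ≤ L
        then PySem.Dict.counter ((PySem.List.pyRange 0 ((c.length : Int) - L + 1) 1).map (fun i => keyW c i L))
        else PySem.Dict.empty := by
  rw [PySem.List.foldl_congr_mem _ _
    (fun cs i => (PySem.List.pyRange 1
      ((if (c.length : Int) < i + mx then (c.length : Int) else i + mx) - i + 1) 1).foldl
        (lenStep mn c i) cs) _ (by
    intro acc i hmem
    rw [PySem.List.mem_pyRange_one] at hmem
    dsimp only
    by_cases hmi : (if (c.length : Int) < i + mx then (c.length : Int) else i + mx) < i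
    · rw [PySem.List.pyRange_one_eq_nil (le_of_lt hmi),
        PySem.List.pyRange_one_eq_nil (by omega :
          (if (c.length : Int) < i + mx then (c.length : Int) else i + mx) - i + 1 ≤ 1)]
      simp
    · push Not at hmi
      have hmn2 : (if (c.length : Int) < i + mx then (c.length : Int) else i + mx) ≤ (c.length : Int) := by
        split <;> omega
      obtain ⟨t, htE⟩ : ∃ t : Nat, (t : Int) =
          (if (c.length : Int) < i + mx then (c.length : Int) else i + mx) - i :=
        ⟨((if (c.length : Int) < i + mx then (c.length : Int) else i + mx) - i).toNat, by omega⟩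
      rw [show (if (c.length : Int) < i + mx then (c.length : Int) else i + mx) = i + (t : Int) by omega]
      rw [sweepEq c mn i t (by omega) (by omega) acc]
      rw [show i + (t : Int) - i + 1 = (t : Int) + 1 by ring])]
  have H : ∀ (x : PySem.Dict Int (PySem.Dict String Int)) (y : Int),
      (if 1 ≤ L ∧ L < (if (c.length : Int) < y + mx then (c.length : Int) else y + mx) - y + 1 ∧ mn ≤ L
       then (x.getD L PySem.Dict.empty).modify (keyW c y L) 0 (· + 1)
       else x.getD L PySem.Dict.empty)
        = ((PySem.List.pyRange 1
            ((if (c.length : Int) < y + mx then (c.length : Int) else y + mx) - y + 1) 1).foldl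
              (lenStep mn c y) x).getD L PySem.Dict.empty := by
    intro x y; rw [getD_lenSteps]
  rw [← List.foldl_hom (fun cs : PySem.Dict Int (PySem.Dict String Int) => cs.getD L PySem.Dict.empty)
    (g₁ := fun cs i => (PySem.List.pyRange 1
      ((if (c.length : Int) < i + mx then (c.length : Int) else i + mx) - i + 1) 1).foldl
        (lenStep mn c i) cs)
    (g₂ := fun d y => if 1 ≤ L ∧ L < (if (c.length : Int) < y + mx then (c.length : Int) else y + mx) - y + 1 ∧ mn ≤ L
      then d.modify (keyW c y L) 0 (· + 1) else d) H]
  rw [PySem.Dict.getD_empty]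
  rw [PySem.List.foldl_congr_mem _ _
    (fun d i => if (1 ≤ L ∧ L ≤ mx ∧ mn ≤ L) ∧ i + L ≤ (c.length : Int)
      then d.modify (keyW c i L) 0 (· + 1) else d) _ (by
    intro acc x hx
    dsimp only
    have hiff : (1 ≤ L ∧ L < (if (c.length : Int) < x + mx then (c.length : Int) else x + mx) - x + 1 ∧ mn ≤ L)
        ↔ ((1 ≤ L ∧ L ≤ mx ∧ mn ≤ L) ∧ x + L ≤ (c.length : Int)) := by
      split_ifs with hxx
      · constructor
        · rintro ⟨a, b, d⟩; exact ⟨⟨a, by omega, d⟩, by omega⟩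
        · rintro ⟨⟨a, b, d⟩, e⟩; exact ⟨a, by omega, d⟩
      · constructor
        · rintro ⟨a, b, d⟩; exact ⟨⟨a, by omega, d⟩, by omega⟩
        · rintro ⟨⟨a, b, d⟩, e⟩; exact ⟨a, by omega, d⟩
    rw [if_congr hiff rfl rfl])]
  by_cases hP : 1 ≤ L ∧ L ≤ mx ∧ mn ≤ L
  · rw [if_pos hP]
    rw [PySem.List.foldl_congr_mem _ _
      (fun d i => if i + L ≤ (c.length : Int) then d.modify (keyW c i L) 0 (· + 1) else d) _ (by
      intro acc x hx
      dsimp only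
      rw [if_congr (Iff.intro (fun hh => hh.2) (fun hq => ⟨hP, hq⟩)) rfl rfl])]
    rw [PySem.List.foldl_ite_eq_foldl_filter (fun i => i + L ≤ (c.length : Int))]
    rw [filter_range_cut (c.length : Int) L hP.1]
    rw [PySem.Dict.counter_eq_foldl, List.foldl_map]
  · rw [if_neg hP]
    rw [PySem.List.foldl_congr_mem _ _ (fun d _ => d) _ (by
      intro acc x hx
      dsimp only
      rw [if_neg (fun hh => hP hh.1)]), PySem.List.foldl_ignore]

-- ===== VERDICT (by name: the statement is the Claim_ definition above) =====
theorem isomorph_spec : Claim_unchanged_isomorph := by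
  intro c mn mx _ hnd
  show isomorph c mn mx = isomorph_alt c mn mx
  unfold isomorph isomorph_alt
  dsimp only
  congr 1
  apply PySem.List.foldl_congr_mem
  intro acc L hL
  rw [PySem.List.mem_pyRange_one] at hL
  rw [counters_getD c mn mx L]
  by_cases h1 : 1 ≤ L
  · rw [if_pos ⟨h1, by omega, by omega⟩]
    rw [PySem.List.foldl_append_singleton_eq_map, List.nil_append]
    rw [PySem.Dict.items_eq_map_keys _ (PySem.Dict.nodup_keys_counter _) 0, List.foldl_map]
    simp only [keyW]
  · rw [if_neg (by rintro ⟨hh, -⟩; omega)]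
    have hnlen : ¬ (mn + 1 ≤ (c.length : Int)) := fun hh =>
      hnd ⟨by omega, by omega, hh⟩
    have hc0 : c.length = 0 := by omega
    have hmneq : mn = 0 := by omega
    have hL0 : L = 0 := by omega
    have hcnil : c = [] := List.length_eq_zero_iff.mp hc0
    subst hcnil hmneq hL0
    have e1 : PySem.List.pyRange 0 (((( [] : List Int).length : Int)) - 0 + 1) 1 = [0] := by decide
    rw [e1]
    simp only [List.foldl_cons, List.foldl_nil, List.nil_append]
    have hj : PySem.Str.join "-"
        ((PySem.List.slice ([] : List Int) (some 0) (some (0 + 0))).map PySem.Int.toStr) = "" := by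
      decide
    rw [hj]
    have hkeys : (PySem.Dict.counter [("" : String)]).keys = [""] := by decide
    rw [hkeys]
    simp only [List.foldl_cons, List.foldl_nil]
    rw [if_neg (by decide)]
    have hemp : (PySem.Dict.empty : PySem.Dict String Int).items = [] := rfl
    rw [hemp]
    simp only [List.foldl_nil]

theorem isomorph_changed : Claim_changed_isomorph := by
  unfold Claim_changed_isomorph; decide
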